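-- pv_equiv track=rewrite | github.com/sharurivas/project | par1.py | Par
-- ===== SOURCE A (Python) =====
-- lista= [0, 1, 2, 3, 4, 5, 6, 7, 8, 9, 10]
--
-- def Par(lista):
--     nuevaLista=[]
--     listaFinal=[]
--     for x in lista:
--         if x%2==0:
--             nuevaLista.append(x)      #elementos pares
--
--     for x in range(len(nuevaLista)):     #range es para que en el for se itere en cada numero desde 0 hasta el len de nueva lista
--         listaFinal.append(nuevaLista[len(nuevaLista)-1-x])   #como el primer valor de x es cero, entonces a lista final le asigno el ultiom de la nueva lista que es len-1
--     return listaFinal     #return es para que me devuelva lo que quiero, no lo escribe y todo lo de dsps no ejecuta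
-- ===== SOURCE B (Python) =====
-- def Par(lista):
--     # Single forward pass: prepend each even element, so the accumulator
--     # is already the evens in reverse order -- no separate reversal pass.
--     out = []
--     for x in lista:
--         if x % 2 == 0:
--             out.insert(0, x)
--     return out
-- ===== Notes on version B (the rewrite author's own statement) =====
-- stated objective: alternative
-- what changed: Replaces A's two staged passes (append evens to a list, then copy it backwards by index arithmetic) with one forward pass that builds the answer directly by prepending each even element to the accumulator, so no reversal step exists at all.
import Mathlib
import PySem

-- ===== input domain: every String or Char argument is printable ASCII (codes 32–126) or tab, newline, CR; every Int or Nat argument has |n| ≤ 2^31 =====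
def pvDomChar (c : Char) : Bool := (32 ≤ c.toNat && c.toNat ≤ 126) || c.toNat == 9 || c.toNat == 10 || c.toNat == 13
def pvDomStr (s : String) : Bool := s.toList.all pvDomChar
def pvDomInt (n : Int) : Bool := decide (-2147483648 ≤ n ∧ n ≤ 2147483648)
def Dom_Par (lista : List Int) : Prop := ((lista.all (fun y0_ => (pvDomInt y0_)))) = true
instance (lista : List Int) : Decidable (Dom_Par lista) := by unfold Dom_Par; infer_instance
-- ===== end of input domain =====

-- B: one forward pass that PREPENDS each even element to the accumulator (the answer is
-- built at its front), instead of A's two staged passes (append evens, then copy backwards).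
-- ===== PORT A =====
def Par (lista : List Int) : List Int :=
  let nuevaLista : List Int :=
    lista.foldl (fun acc x => if PySem.Int.mod x 2 = 0 then acc ++ [x] else acc) []
  let listaFinal : List Int :=
    (PySem.List.pyRange 0 (nuevaLista.length : Int) 1).foldl
      (fun acc x => acc ++ [PySem.List.pyGetD nuevaLista ((nuevaLista.length : Int) - 1 - x) 0]) []
  listaFinal

-- ===== PORT B =====
def Par_alt (lista : List Int) : List Int :=
  lista.foldl (fun out x => if PySem.Int.mod x 2 = 0 then PySem.List.insert out 0 x else out) []

-- ===== PRECONDITION & SPEC =====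
def Spec_Par (lista : List Int) (out : List Int) : Prop := out = Par_alt lista
instance (lista : List Int) (out : List Int) : Decidable (Spec_Par lista out) := by unfold Spec_Par; infer_instance

-- ===== CLAIM =====
def Claim_equal_Par : Prop := ∀ (lista : List Int), Dom_Par lista → Spec_Par lista (Par lista)

-- ===== LEMMAS AND PROOFS =====

-- A's first loop is List.filter.
theorem pv_filter_loop (l : List Int) :
    l.foldl (fun acc x => if PySem.Int.mod x 2 = 0 then acc ++ [x] else acc) []
      = l.filter (fun x => decide (PySem.Int.mod x 2 = 0)) := by
  simpa using PySem.List.foldl_append_if (fun x => decide (PySem.Int.mod x 2 = 0)) id l []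

-- A's second loop, applied to any list, is its reverse.
theorem pv_rev_loop (l : List Int) :
    (PySem.List.pyRange 0 (l.length : Int) 1).foldl
      (fun acc x => acc ++ [PySem.List.pyGetD l ((l.length : Int) - 1 - x) 0]) []
      = l.reverse := by
  rw [PySem.List.foldl_append_singleton_eq_map, PySem.List.pyRange_one, List.map_map, List.nil_append]
  apply List.ext_getElem
  · simp
  · intro k h1 h2
    simp only [List.getElem_map, List.getElem_range, Function.comp]
    have hk : k < l.length := by simpa using h1
    rw [List.getElem_reverse]
    have harg : (0 : Int) + (k : Int) = (k : Int) := by ring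
    rw [harg]
    have : ((l.length : Int) - 1 - (k : Int)) = ((l.length - 1 - k : Nat) : Int) := by omega
    rw [this, PySem.List.pyGetD_natCast]
    exact List.getD_eq_getElem l 0 (by omega)

-- B's prepend loop builds the reversed filtered list, generalized over the accumulator.
theorem pv_prepend_loop (l acc : List Int) :
    l.foldl (fun out x => if PySem.Int.mod x 2 = 0 then PySem.List.insert out 0 x else out) acc
      = (l.filter (fun x => decide (PySem.Int.mod x 2 = 0))).reverse ++ acc := by
  induction l generalizing acc with
  | nil => simp
  | cons h t ih =>
    rw [List.foldl_cons]
    by_cases he : PySem.Int.mod h 2 = 0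
    · rw [if_pos he, PySem.List.insert_zero, ih,
        List.filter_cons_of_pos (by simpa using he), List.reverse_cons, List.append_assoc]
      rfl
    · rw [if_neg he, ih, List.filter_cons_of_neg (by simpa using he)]

-- ===== VERDICT =====
theorem Par_spec : Claim_equal_Par := by
  intro lista _
  unfold Spec_Par Par Par_alt
  simp only [pv_filter_loop, pv_rev_loop, pv_prepend_loop, List.append_nil]
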